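-- pv_equiv track=rewrite | github.com/JonatanESalinas/Robid_GUI | Paciente.py | modificarString_agregaEnter
-- ===== SOURCE A (Python) =====
-- def modificarString_agregaEnter(stringHoras):
-- 	nuevoString = ''
-- 	longi = len(stringHoras)
--
-- 	for i in range(0, longi):
-- 		if stringHoras[i] != ' ':
-- 			nuevoString = nuevoString + stringHoras[i]
-- 		else:
-- 			nuevoString = nuevoString + '\n'
--
-- 	return nuevoString
-- ===== SOURCE B (Python) =====
-- def modificarString_agregaEnter(stringHoras):
--     return '\n'.join(stringHoras.split(' '))
-- ===== Notes on version B (the rewrite author's own statement) =====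
-- stated objective: faster
-- what changed: Replaces the index-driven character-by-character conditional string concatenation with a tokenize-then-rejoin pass: split on the explicit single-space separator (preserving empty segments) and join the segments with newlines.
import Mathlib
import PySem

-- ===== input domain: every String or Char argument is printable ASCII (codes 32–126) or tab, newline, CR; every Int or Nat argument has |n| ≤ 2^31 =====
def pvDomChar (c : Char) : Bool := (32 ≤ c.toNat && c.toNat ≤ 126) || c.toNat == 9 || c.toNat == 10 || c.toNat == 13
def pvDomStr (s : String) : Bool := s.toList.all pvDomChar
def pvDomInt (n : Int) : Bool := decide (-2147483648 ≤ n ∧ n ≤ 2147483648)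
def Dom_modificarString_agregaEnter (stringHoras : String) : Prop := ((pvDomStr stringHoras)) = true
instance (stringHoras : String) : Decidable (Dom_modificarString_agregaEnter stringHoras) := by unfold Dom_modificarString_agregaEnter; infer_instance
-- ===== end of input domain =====

-- B replaces A's index-driven per-character conditional concatenation by split(' ')-then-'\n'.join (idiomatic, same result).

-- ===== PORT A =====
-- character loop over range(0, len(stringHoras)), appending either the char or '\n'
def modificarString_agregaEnter (stringHoras : String) : String :=
  let longi := PySem.Str.len stringHoras
  String.ofList ((PySem.List.pyRange 0 longi).foldl
    (fun nuevoString i =>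
      if PySem.List.pyGetD stringHoras.toList i ' ' ≠ ' '
      then nuevoString ++ [PySem.List.pyGetD stringHoras.toList i ' ']
      else nuevoString ++ ['\n']) ([] : List Char))

-- ===== PORT B =====
-- '\n'.join(stringHoras.split(' ')); split? is none only for an empty separator, never here
def modificarString_agregaEnter_alt (stringHoras : String) : String :=
  PySem.Str.join "\n" ((PySem.Str.split? stringHoras " ").getD [])

-- ===== PRECONDITION & SPEC =====
def Spec_modificarString_agregaEnter (stringHoras : String) (out : String) : Prop := out = modificarString_agregaEnter_alt stringHoras
instance (stringHoras : String) (out : String) : Decidable (Spec_modificarString_agregaEnter stringHoras out) := by unfold Spec_modificarString_agregaEnter; infer_instance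

-- ===== CLAIM (what is proved, stated in full; the proofs are below) =====
def Claim_equal_modificarString_agregaEnter : Prop := ∀ (stringHoras : String), Dom_modificarString_agregaEnter stringHoras → Spec_modificarString_agregaEnter stringHoras (modificarString_agregaEnter stringHoras)

-- ===== LEMMAS AND PROOFS =====

def pvRepl (c : Char) : Char := if c = ' ' then '\n' else c

def pvPieces : List Char → List Char → List (List Char)
  | [], cur => [cur.reverse]
  | c :: rest, cur => if c = ' ' then cur.reverse :: pvPieces rest [] else pvPieces rest (c :: cur)

theorem pv_go_eq : ∀ (fuel : Nat) (l cur : List Char) (acc : List (List Char)), l.length < fuel →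
    PySem.Chars.splitOn.go [' '] fuel l cur acc = acc.reverse ++ pvPieces l cur := by
  intro fuel
  induction fuel with
  | zero => intro l cur acc h; omega
  | succ n ih =>
    intro l cur acc h
    cases l with
    | nil => simp [PySem.Chars.splitOn.go, pvPieces]
    | cons c rest =>
      by_cases hc : c = ' '
      · subst hc
        rw [show PySem.Chars.splitOn.go [' '] (n+1) (' ' :: rest) cur acc
              = PySem.Chars.splitOn.go [' '] n rest [] (cur.reverse :: acc) by
            simp [PySem.Chars.splitOn.go, List.isPrefixOf]]
        rw [ih rest [] (cur.reverse :: acc) (by simpa using Nat.lt_of_succ_lt_succ h)]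
        simp [pvPieces]
      · rw [show PySem.Chars.splitOn.go [' '] (n+1) (c :: rest) cur acc
              = PySem.Chars.splitOn.go [' '] n rest (c :: cur) acc by
            simp [PySem.Chars.splitOn.go, List.isPrefixOf, Ne.symm hc]]
        rw [ih rest (c :: cur) acc (by simpa using Nat.lt_of_succ_lt_succ h)]
        simp [pvPieces, hc]

theorem pv_pieces_ne_nil : ∀ (l cur : List Char), pvPieces l cur ≠ [] := by
  intro l
  induction l with
  | nil => intro cur; simp [pvPieces]
  | cons c rest ih => intro cur; by_cases hc : c = ' ' <;> simp [pvPieces, hc, ih]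

theorem pv_join_pieces : ∀ (l cur : List Char),
    PySem.Chars.join ['\n'] (pvPieces l cur) = cur.reverse ++ l.map pvRepl := by
  intro l
  induction l with
  | nil => intro cur; simp [pvPieces, PySem.Chars.join_singleton]
  | cons c rest ih =>
    intro cur
    by_cases hc : c = ' '
    · subst hc
      have hne := pv_pieces_ne_nil rest []
      rcases hp : pvPieces rest [] with _ | ⟨p, ps⟩
      · exact absurd hp hne
      · rw [show pvPieces (' ' :: rest) cur = cur.reverse :: p :: ps by simp [pvPieces, hp]]
        rw [PySem.Chars.join_cons_cons]
        have := ih []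
        rw [hp] at this
        simp [this, pvRepl]
    · rw [show pvPieces (c :: rest) cur = pvPieces rest (c :: cur) by simp [pvPieces, hc]]
      rw [ih (c :: cur)]
      simp [pvRepl, hc]

theorem pv_join_splitOn (cs : List Char) :
    PySem.Chars.join ['\n'] (PySem.Chars.splitOn cs [' ']) = cs.map pvRepl := by
  rw [PySem.Chars.splitOn, pv_go_eq (cs.length + 1) cs [] [] (by omega)]
  simp only [List.reverse_nil, List.nil_append]
  rw [pv_join_pieces]
  simp

theorem pv_foldlA (cs : List Char) (acc : List Char) :
    cs.foldl (fun nuevoString c =>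
      if c = ' ' then nuevoString ++ ['\n'] else nuevoString ++ [c]) acc
      = acc ++ cs.map pvRepl := by
  induction cs generalizing acc with
  | nil => simp
  | cons c rest ih =>
    simp only [List.foldl_cons]
    by_cases hc : c = ' '
    · rw [if_pos hc, ih]; simp [pvRepl, hc]
    · rw [if_neg hc, ih]; simp [pvRepl, hc]

-- ===== VERDICT (by name: the statement is the Claim_ definition above) =====
theorem modificarString_agregaEnter_spec : Claim_equal_modificarString_agregaEnter := by
  intro s _
  unfold Spec_modificarString_agregaEnter modificarString_agregaEnter modificarString_agregaEnter_alt
  have hA : (PySem.List.pyRange 0 (PySem.Str.len s)).foldl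
      (fun nuevoString i =>
        if PySem.List.pyGetD s.toList i ' ' ≠ ' '
        then nuevoString ++ [PySem.List.pyGetD s.toList i ' ']
        else nuevoString ++ ['\n']) ([] : List Char) = s.toList.map pvRepl := by
    have h := PySem.List.foldl_pyRange_zero_pyGetD' s.toList ' '
      (fun nuevoString c => if c ≠ ' ' then nuevoString ++ [c] else nuevoString ++ ['\n'])
      ([] : List Char)
    simpa [pv_foldlA, PySem.Str.len] using h
  rcases hsplit : PySem.Str.split? s " " with _ | L
  · exfalso
    have h := PySem.Str.split?_map s " "
    rw [hsplit] at h
    simp [PySem.Chars.split?] at h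
  · have hmap : L.map String.toList = PySem.Chars.splitOn s.toList [' '] := by
      have h := PySem.Str.split?_map s " "
      rw [hsplit] at h
      simpa [PySem.Chars.split?] using h
    rw [← String.toList_inj]
    simp only [Option.getD_some, hA]
    rw [PySem.Str.toList_join]
    rw [show ("\n" : String).toList = ['\n'] from rfl, hmap, pv_join_splitOn]
    simp
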